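-- pv_equiv track=rewrite | github.com/DTMBX/EVIDENT | services/discrepancy_detector.py | _are_related_topics
-- ===== SOURCE A (Python) =====
-- from typing import Dict, List, Optional, Set, Tuple
--
-- def _are_related_topics(entities1: Dict, entities2: Dict) -> bool:
--     """Check if two entity sets discuss related topics"""
--
--     if not entities1 or not entities2:
--         return False
--
--     # Check for overlap in entity types and values
--     common_types = set(entities1.keys()) & set(entities2.keys())
--
--     if not common_types:
--         return False
--
--     # Check for value overlap within common types
--     for entity_type in common_types:
--         set1 = set(entities1[entity_type])
--         set2 = set(entities2[entity_type])
--
--         if set1 & set2:  # Any overlap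
--             return True
--
--     return False
-- ===== SOURCE B (Python) =====
-- def _are_related_topics(entities1, entities2):
--     """Check if two entity sets discuss related topics"""
--
--     if not entities1 or not entities2:
--         return False
--
--     # Inverted index: value -> set of entity types in entities1 carrying that value.
--     inv = {}
--     for entity_type, values in entities1.items():
--         for v in values:
--             inv.setdefault(v, set()).add(entity_type)
--
--     # Scan entities2 once; succeed on the first value whose inverted entry holds its own type.
--     for entity_type, values in entities2.items():
--         if entity_type in entities1:
--             for v in values:
--                 if entity_type in inv.get(v, ()):
--                     return True
--     return False
-- ===== Notes on version B (the rewrite author's own statement) =====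
-- stated objective: alternative
-- what changed: Replaces the common-key set and per-type set intersections with an inverted index keyed by VALUE (value -> set of types) built in one pass over entities1, then a single early-return scan of entities2 asking whether a value's inverted entry contains its own type; no key intersection and no set-intersection operations remain.
import Mathlib
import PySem

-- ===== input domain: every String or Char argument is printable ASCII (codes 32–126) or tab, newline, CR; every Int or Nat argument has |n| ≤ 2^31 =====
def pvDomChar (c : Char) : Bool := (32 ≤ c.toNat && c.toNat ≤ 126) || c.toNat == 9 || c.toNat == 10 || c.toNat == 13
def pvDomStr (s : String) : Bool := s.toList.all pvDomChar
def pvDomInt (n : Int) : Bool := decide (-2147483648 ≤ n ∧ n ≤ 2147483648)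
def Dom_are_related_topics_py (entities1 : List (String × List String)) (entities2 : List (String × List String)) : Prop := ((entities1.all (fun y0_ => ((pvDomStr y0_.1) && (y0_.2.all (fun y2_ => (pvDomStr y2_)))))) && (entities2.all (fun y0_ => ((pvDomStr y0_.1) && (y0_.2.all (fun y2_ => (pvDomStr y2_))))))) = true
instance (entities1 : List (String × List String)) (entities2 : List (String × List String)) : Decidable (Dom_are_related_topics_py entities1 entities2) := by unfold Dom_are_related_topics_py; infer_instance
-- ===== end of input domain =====

-- B replaces the common-key set + per-type set intersections with an inverted index keyed by value (value -> set of types) and one early-return scan of entities2; alternative decomposition, same cost.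


-- ===== PORT A =====
-- first-match association-list lookup: Python's entities[entity_type] under the dict-as-assoc-list convention
def pvGetItem (d : List (String × List String)) (k : String) : List String :=
  ((d.find? (fun p => p.1 == k)).map Prod.snd).getD []

def are_related_topics_py (entities1 : List (String × List String)) (entities2 : List (String × List String)) : Bool :=
  if entities1.isEmpty || entities2.isEmpty then false
  else
    let common_types := PySem.Set.inter (PySem.Set.ofList (entities1.map Prod.fst)) (PySem.Set.ofList (entities2.map Prod.fst))
    if common_types.isEmpty then false
    else
      -- for entity_type in common_types: if set1 & set2: return True  (early return = any; Boolean result is set-iteration-order independent)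
      common_types.any (fun t =>
        let set1 := PySem.Set.ofList (pvGetItem entities1 t)
        let set2 := PySem.Set.ofList (pvGetItem entities2 t)
        !(PySem.Set.inter set1 set2).isEmpty)

-- ===== PORT B =====
def are_related_topics_py_alt (entities1 : List (String × List String)) (entities2 : List (String × List String)) : Bool :=
  if entities1.isEmpty || entities2.isEmpty then false
  else
    -- inv = {}; for entity_type, values in entities1.items(): for v in values: inv.setdefault(v, set()).add(entity_type)
    let inv : PySem.Dict String (PySem.Set String) :=
      entities1.foldl (fun d p => p.2.foldl (fun d v => d.modify v PySem.Set.empty (fun s => PySem.Set.add s p.1)) d) PySem.Dict.empty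
    -- for entity_type, values in entities2.items(): if entity_type in entities1: for v in values: if entity_type in inv.get(v, ()): return True
    entities2.any (fun q =>
      (entities1.any (fun p => p.1 == q.1)) &&
      q.2.any (fun v => PySem.Set.contains (inv.getD v PySem.Set.empty) q.1))

-- ===== PRECONDITION & SPEC =====
-- Pre_ excludes association lists with duplicate keys: they do not represent any Python dict (the
-- Python function's arguments are dicts, whose keys are unique), so either port's behaviour there is
-- an accident of the encoding (A's port looks up the FIRST entry per key, B's port folds over ALL entries).
def Pre_are_related_topics_py (entities1 : List (String × List String)) (entities2 : List (String × List String)) : Prop :=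
  (entities1.map Prod.fst).Nodup ∧ (entities2.map Prod.fst).Nodup
instance (entities1 : List (String × List String)) (entities2 : List (String × List String)) : Decidable (Pre_are_related_topics_py entities1 entities2) := by unfold Pre_are_related_topics_py; infer_instance

def pvWitness_are_related_topics_py : (List (String × List String)) × (List (String × List String)) :=
  ([("person", ["alice", "bob"]), ("place", ["rome"])], [("person", ["bob"]), ("org", ["acme"])])

def Spec_are_related_topics_py (entities1 : List (String × List String)) (entities2 : List (String × List String)) (out : Bool) : Prop := out = are_related_topics_py_alt entities1 entities2
instance (entities1 : List (String × List String)) (entities2 : List (String × List String)) (out : Bool) : Decidable (Spec_are_related_topics_py entities1 entities2 out) := by unfold Spec_are_related_topics_py; infer_instance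

-- ===== CLAIM (what is proved, stated in full; the proofs are below) =====
def Claim_equal_are_related_topics_py : Prop := ∀ (entities1 : List (String × List String)) (entities2 : List (String × List String)), Dom_are_related_topics_py entities1 entities2 → Pre_are_related_topics_py entities1 entities2 → Spec_are_related_topics_py entities1 entities2 (are_related_topics_py entities1 entities2)

-- ===== LEMMAS AND PROOFS =====

-- the common "related" predicate both programs decide (under unique keys)
def pvRelated (e1 e2 : List (String × List String)) : Prop :=
  ∃ p ∈ e1, ∃ q ∈ e2, p.1 = q.1 ∧ ∃ v, v ∈ p.2 ∧ v ∈ q.2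

theorem pv_ex_mem {α : Type} (l : List α) : (!l.isEmpty) = true ↔ ∃ x, x ∈ l := by
  cases l <;> simp

theorem pv_contains_iff {α : Type} [BEq α] [LawfulBEq α] (s : List α) (x : α) :
    PySem.Set.contains s x = true ↔ x ∈ s := by
  simp [PySem.Set.contains]

theorem pv_mem_getItem (e : List (String × List String)) (h : (e.map Prod.fst).Nodup)
    (t v : String) : v ∈ pvGetItem e t ↔ ∃ p ∈ e, p.1 = t ∧ v ∈ p.2 := by
  unfold pvGetItem
  constructor
  · intro hv
    cases hfind : e.find? (fun p => p.1 == t) with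
    | none => simp [hfind] at hv
    | some q =>
      refine ⟨q, List.mem_of_find?_eq_some hfind, ?_, ?_⟩
      · simpa using List.find?_some hfind
      · simpa [hfind] using hv
  · rintro ⟨p, hp, hpt, hv⟩
    cases hfind : e.find? (fun p => p.1 == t) with
    | none =>
      have := List.find?_eq_none.mp hfind p hp
      simp [hpt] at this
    | some q =>
      have hq : q ∈ e := List.mem_of_find?_eq_some hfind
      have hqt : q.1 = t := by simpa using List.find?_some hfind
      have : p = q := List.inj_on_of_nodup_map h hp hq (by rw [hpt, hqt])
      subst this
      simpa [hfind] using hv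

-- inner fold of B's index build
theorem pv_inv_inner (vs : List String) (t : String) (d : PySem.Dict String (PySem.Set String))
    (v t' : String) :
    t' ∈ (vs.foldl (fun d v => d.modify v PySem.Set.empty (fun s => PySem.Set.add s t)) d).getD v PySem.Set.empty
      ↔ t' ∈ d.getD v PySem.Set.empty ∨ (t' = t ∧ v ∈ vs) := by
  induction vs generalizing d with
  | nil => simp
  | cons w ws ih =>
    simp only [List.foldl_cons, ih, PySem.Dict.getD_modify]
    by_cases hvw : v = w
    · subst hvw
      simp only [if_true, PySem.Set.mem_add, List.mem_cons]
      tauto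
    · simp only [if_neg hvw, List.mem_cons]
      have : ¬ (v = w) := hvw
      tauto

-- outer fold of B's index build
theorem pv_inv (e : List (String × List String)) (d : PySem.Dict String (PySem.Set String))
    (v t : String) :
    t ∈ (e.foldl (fun d p => p.2.foldl (fun d v => d.modify v PySem.Set.empty (fun s => PySem.Set.add s p.1)) d) d).getD v PySem.Set.empty
      ↔ t ∈ d.getD v PySem.Set.empty ∨ ∃ p ∈ e, p.1 = t ∧ v ∈ p.2 := by
  induction e generalizing d with
  | nil => simp
  | cons p ps ih =>
    simp only [List.foldl_cons, ih, pv_inv_inner]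
    constructor
    · rintro (⟨h | ⟨rfl, hv⟩⟩ | ⟨q, hq, hqt, hv⟩)
      · exact Or.inl h
      · exact Or.inr ⟨p, by simp, rfl, hv⟩
      · exact Or.inr ⟨q, by simp [hq], hqt, hv⟩
    · rintro (h | ⟨q, hq, hqt, hv⟩)
      · exact Or.inl (Or.inl h)
      · rcases List.mem_cons.mp hq with rfl | hq'
        · exact Or.inl (Or.inr ⟨hqt.symm, hv⟩)
        · exact Or.inr ⟨q, hq', hqt, hv⟩

theorem pv_A_iff (e1 e2 : List (String × List String))
    (h1 : (e1.map Prod.fst).Nodup) (h2 : (e2.map Prod.fst).Nodup) :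
    are_related_topics_py e1 e2 = true ↔ pvRelated e1 e2 := by
  unfold are_related_topics_py
  by_cases hemp : (e1.isEmpty || e2.isEmpty) = true
  · rw [if_pos hemp]
    simp only [Bool.false_eq_true, false_iff]
    rintro ⟨p, hp, q, hq, -⟩
    rcases Bool.or_eq_true_iff.mp hemp with h | h
    · exact absurd hp (by simp [List.isEmpty_iff.mp h])
    · exact absurd hq (by simp [List.isEmpty_iff.mp h])
  · rw [if_neg hemp]
    have hcomm : ∀ t, t ∈ PySem.Set.inter (PySem.Set.ofList (e1.map Prod.fst)) (PySem.Set.ofList (e2.map Prod.fst))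
        ↔ t ∈ e1.map Prod.fst ∧ t ∈ e2.map Prod.fst := by
      intro t
      rw [PySem.Set.mem_inter, PySem.Set.mem_ofList, PySem.Set.mem_ofList]
    by_cases hc : (PySem.Set.inter (PySem.Set.ofList (e1.map Prod.fst)) (PySem.Set.ofList (e2.map Prod.fst))).isEmpty = true
    · rw [if_pos hc]
      simp only [Bool.false_eq_true, false_iff]
      rintro ⟨p, hp, q, hq, hpq, -⟩
      have : p.1 ∈ PySem.Set.inter (PySem.Set.ofList (e1.map Prod.fst)) (PySem.Set.ofList (e2.map Prod.fst)) :=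
        (hcomm p.1).mpr ⟨List.mem_map_of_mem hp, hpq ▸ List.mem_map_of_mem hq⟩
      rw [List.isEmpty_iff.mp hc] at this
      exact absurd this (List.not_mem_nil)
    · rw [if_neg hc, List.any_eq_true]
      constructor
      · rintro ⟨t, ht, hov⟩
        obtain ⟨v, hv⟩ := (pv_ex_mem _).mp hov
        rw [PySem.Set.mem_inter, PySem.Set.mem_ofList, PySem.Set.mem_ofList,
          pv_mem_getItem e1 h1, pv_mem_getItem e2 h2] at hv
        obtain ⟨⟨p, hp, hpt, hv1⟩, ⟨q, hq, hqt, hv2⟩⟩ := hv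
        exact ⟨p, hp, q, hq, by rw [hpt, hqt], v, hv1, hv2⟩
      · rintro ⟨p, hp, q, hq, hpq, v, hv1, hv2⟩
        refine ⟨p.1, (hcomm p.1).mpr ⟨List.mem_map_of_mem hp, hpq ▸ List.mem_map_of_mem hq⟩, ?_⟩
        refine (pv_ex_mem _).mpr ⟨v, ?_⟩
        rw [PySem.Set.mem_inter, PySem.Set.mem_ofList, PySem.Set.mem_ofList,
          pv_mem_getItem e1 h1, pv_mem_getItem e2 h2]
        exact ⟨⟨p, hp, rfl, hv1⟩, ⟨q, hq, hpq.symm, hv2⟩⟩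

theorem pv_B_iff (e1 e2 : List (String × List String)) :
    are_related_topics_py_alt e1 e2 = true ↔ pvRelated e1 e2 := by
  unfold are_related_topics_py_alt
  by_cases hemp : (e1.isEmpty || e2.isEmpty) = true
  · rw [if_pos hemp]
    simp only [Bool.false_eq_true, false_iff]
    rintro ⟨p, hp, q, hq, -⟩
    rcases Bool.or_eq_true_iff.mp hemp with h | h
    · exact absurd hp (by simp [List.isEmpty_iff.mp h])
    · exact absurd hq (by simp [List.isEmpty_iff.mp h])
  · rw [if_neg hemp, List.any_eq_true]
    constructor
    · rintro ⟨q, hq, hb⟩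
      obtain ⟨-, hb2⟩ := Bool.and_eq_true_iff.mp hb
      obtain ⟨v, hv, hcont⟩ := List.any_eq_true.mp hb2
      have := (pv_contains_iff _ _).mp hcont
      rw [pv_inv, PySem.Dict.getD_empty] at this
      rcases this with h | ⟨p, hp, hpt, hvp⟩
      · exact absurd h (List.not_mem_nil)
      · exact ⟨p, hp, q, hq, hpt, v, hvp, hv⟩
    · rintro ⟨p, hp, q, hq, hpq, v, hv1, hv2⟩
      refine ⟨q, hq, Bool.and_eq_true_iff.mpr ⟨?_, ?_⟩⟩
      · exact List.any_eq_true.mpr ⟨p, hp, by simp [hpq]⟩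
      · refine List.any_eq_true.mpr ⟨v, hv2, (pv_contains_iff _ _).mpr ?_⟩
        rw [pv_inv, PySem.Dict.getD_empty]
        exact Or.inr ⟨p, hp, hpq, hv1⟩

-- ===== VERDICT (by name: the statement is the Claim_ definition above) =====
theorem are_related_topics_py_spec : Claim_equal_are_related_topics_py := by
  intro e1 e2 _ hpre
  unfold Spec_are_related_topics_py
  rw [Bool.eq_iff_iff, pv_A_iff e1 e2 hpre.1 hpre.2, pv_B_iff]
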